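-- pv_equiv track=rewrite | github.com/denizetkar/tensorflow_test | RNN/char_level_lm.py | read_batch
-- ===== SOURCE A (Python) =====
-- def read_batch(line_stream, batch_size):
--     batch = []
--     for line in line_stream:
--         batch.append(line)
--         if len(batch) == batch_size:
--             yield batch
--             batch = []
--     yield batch
-- ===== SOURCE B (Python) =====
-- def read_batch(line_stream, batch_size):
--     it = iter(line_stream)
--     while True:
--         batch = [line for _, line in zip(range(batch_size), it)]
--         yield batch
--         if len(batch) < batch_size:
--             break
-- ===== Notes on version B (the rewrite author's own statement) =====
-- stated objective: alternative
-- what changed: Replaces A's per-line accumulator loop with a while loop pulling fixed-size chunks from the iterator (zip with range), so no mutable batch buffer or per-element length test; Pre_ excludes non-positive batch_size, on which B's chunk-pulling loop never terminates while A returns the whole stream as one batch.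
-- outside the precondition, e.g. on read_batch(['a'], 0): A returns [['a']], B does not finish within the time limit; on read_batch(['a'], -1): A returns [['a']], B does not finish within the time limit
import Mathlib
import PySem

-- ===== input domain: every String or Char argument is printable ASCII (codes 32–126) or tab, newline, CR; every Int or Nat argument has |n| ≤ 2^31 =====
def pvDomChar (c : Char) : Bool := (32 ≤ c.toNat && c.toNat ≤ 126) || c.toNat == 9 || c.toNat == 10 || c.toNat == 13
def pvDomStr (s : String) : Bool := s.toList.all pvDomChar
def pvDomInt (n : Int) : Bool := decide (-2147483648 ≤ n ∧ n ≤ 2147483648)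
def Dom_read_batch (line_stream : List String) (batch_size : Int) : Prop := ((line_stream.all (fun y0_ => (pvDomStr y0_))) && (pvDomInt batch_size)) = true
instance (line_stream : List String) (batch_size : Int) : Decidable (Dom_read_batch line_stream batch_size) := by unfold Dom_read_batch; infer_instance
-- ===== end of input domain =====

-- B pulls fixed-size chunks from the iterator in a while loop instead of A's per-line accumulator; equal output for batch_size ≥ 1.


-- ===== PORT A =====
-- the body of A's for-loop: append the line, emit the batch when it reaches batch_size
def pvStepA (batch_size : Int) (st : List (List String) × List String) (line : String) :
    List (List String) × List String :=
  let batch := st.2 ++ [line]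
  if (batch.length : Int) = batch_size then (st.1 ++ [batch], []) else (st.1, batch)

def read_batch (line_stream : List String) (batch_size : Int) : List (List String) :=
  let r := line_stream.foldl (pvStepA batch_size) ([], [])
  r.1 ++ [r.2]

-- ===== PORT B =====
-- B's while loop: pull a chunk of up to batch_size lines, yield it, stop after a short chunk.
-- The fuel argument only makes the recursion total in Lean; inside Pre_ (batch_size ≥ 1) it never
-- runs out, since each pulled chunk is nonempty until the final short one.
def pvLoopB (fuel : Nat) (batch_size : Int) (rest : List String) : List (List String) :=
  match fuel with
  | 0 => []
  | fuel + 1 =>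
    let batch := rest.take batch_size.toNat   -- zip(range(batch_size), it): up to batch_size lines
    if (batch.length : Int) < batch_size then [batch]
    else batch :: pvLoopB fuel batch_size (rest.drop batch_size.toNat)

def read_batch_alt (line_stream : List String) (batch_size : Int) : List (List String) :=
  pvLoopB (line_stream.length + 1) batch_size line_stream

-- ===== PRECONDITION & SPEC =====
-- Pre_ excludes non-positive batch_size, on which A's single whole-stream batch is an accident of its
-- never-firing length test while B's chunk-pulling loop never terminates.
def Pre_read_batch (line_stream : List String) (batch_size : Int) : Prop := 1 ≤ batch_size
instance (line_stream : List String) (batch_size : Int) : Decidable (Pre_read_batch line_stream batch_size) := by unfold Pre_read_batch; infer_instance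
def pvWitness_read_batch : List String × Int := (["ab", "cd", "e"], 2)

def Spec_read_batch (line_stream : List String) (batch_size : Int) (out : List (List String)) : Prop := out = read_batch_alt line_stream batch_size
instance (line_stream : List String) (batch_size : Int) (out : List (List String)) : Decidable (Spec_read_batch line_stream batch_size out) := by unfold Spec_read_batch; infer_instance

-- ===== CLAIM (what is proved, stated in full; the proofs are below) =====
def Claim_equal_read_batch : Prop := ∀ (line_stream : List String) (batch_size : Int), Dom_read_batch line_stream batch_size → Pre_read_batch line_stream batch_size → Spec_read_batch line_stream batch_size (read_batch line_stream batch_size)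

-- ===== LEMMAS AND PROOFS =====

-- reference chunking: successive blocks of b, with the trailing short (possibly empty) block
def pvChunks (b : Nat) (l : List String) : List (List String) :=
  if l.length < b ∨ b = 0 then [l]
  else l.take b :: pvChunks b (l.drop b)
termination_by l.length
decreasing_by simp only [List.length_drop]; omega

theorem pvChunks_short (b : Nat) (l : List String) (h : l.length < b) : pvChunks b l = [l] := by
  rw [pvChunks]; simp [h]

theorem pvChunks_long (b : Nat) (l : List String) (hb : b ≠ 0) (h : b ≤ l.length) :
    pvChunks b l = l.take b :: pvChunks b (l.drop b) := by
  rw [pvChunks]; simp [hb, Nat.not_lt.mpr h]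

theorem foldA_eq (b : Nat) (hb1 : 1 ≤ b) :
    ∀ (l : List String) (acc : List (List String)) (p : List String), p.length < b →
      (let r := l.foldl (pvStepA (b : Int)) (acc, p); r.1 ++ [r.2]) = acc ++ pvChunks b (p ++ l) := by
  intro l
  induction l with
  | nil =>
    intro acc p hp
    simp [pvChunks_short b p hp]
  | cons x t ih =>
    intro acc p hp
    simp only [List.foldl_cons]
    have hstep : pvStepA (b : Int) (acc, p) x =
        if (((p ++ [x]).length : Nat) : Int) = (b : Int) then (acc ++ [p ++ [x]], []) else (acc, p ++ [x]) := rfl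
    by_cases hfull : p.length + 1 = b
    · have hcond : (((p ++ [x]).length : Nat) : Int) = (b : Int) := by
        simp only [List.length_append, List.length_singleton]
        exact_mod_cast hfull
      rw [hstep, if_pos hcond]
      rw [ih (acc ++ [p ++ [x]]) [] (by simpa using hb1)]
      have hlen : (p ++ [x]).length = b := by simpa using hfull
      have hck : pvChunks b (p ++ x :: t) = (p ++ [x]) :: pvChunks b t := by
        have hsplit : p ++ x :: t = (p ++ [x]) ++ t := by simp
        rw [hsplit, pvChunks_long b _ (by omega) (by rw [List.length_append, hlen]; omega)]
        rw [← hlen, List.take_left, List.drop_left]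
      simp [hck]
    · have hcond : ¬ ((((p ++ [x]).length : Nat) : Int) = (b : Int)) := by
        simp only [List.length_append, List.length_singleton]
        exact_mod_cast hfull
      rw [hstep, if_neg hcond]
      rw [ih acc (p ++ [x]) (by simp; omega)]
      simp

theorem loopB_eq (b : Nat) (hb1 : 1 ≤ b) :
    ∀ (fuel : Nat) (l : List String), l.length < fuel →
      pvLoopB fuel (b : Int) l = pvChunks b l := by
  intro fuel
  induction fuel with
  | zero => intro l hl; omega
  | succ fuel ih =>
    intro l hl
    rw [pvLoopB]
    have htn : ((b : Int)).toNat = b := Int.toNat_natCast b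
    by_cases hsh : l.length < b
    · have htake : l.take ((b : Int)).toNat = l := by
        rw [htn]; exact List.take_of_length_le (le_of_lt hsh)
      have hcond : ((l.take ((b : Int)).toNat).length : Int) < (b : Int) := by
        rw [htake]; exact_mod_cast hsh
      rw [if_pos hcond, htake, pvChunks_short b l hsh]
    · have hble : b ≤ l.length := Nat.not_lt.mp hsh
      have hlen : (l.take ((b : Int)).toNat).length = b := by
        rw [htn, List.length_take]; omega
      have hcond : ¬ (((l.take ((b : Int)).toNat).length : Int) < (b : Int)) := by
        rw [hlen]; exact lt_irrefl _
      rw [if_neg hcond, htn]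
      rw [ih (l.drop b) (by simp only [List.length_drop]; omega)]
      rw [pvChunks_long b l (by omega) hble]

-- ===== VERDICT (by name: the statement is the Claim_ definition above) =====
theorem read_batch_spec : Claim_equal_read_batch := by
  intro l bs _hd hpre
  unfold Pre_read_batch at hpre
  unfold Spec_read_batch
  obtain ⟨b, rfl⟩ : ∃ b : Nat, bs = (b : Int) :=
    ⟨bs.toNat, (Int.toNat_of_nonneg (le_trans (by norm_num) hpre)).symm⟩
  have hb1 : 1 ≤ b := by exact_mod_cast hpre
  unfold read_batch_alt
  rw [loopB_eq b hb1 (l.length + 1) l (by omega)]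
  have := foldA_eq b hb1 l [] [] (by simp; omega)
  simpa [read_batch] using this
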